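-- pv_equiv track=rewrite | github.com/anand-prashar/Natural_language_processing | a7/ABHI.py | deep_analysis
-- ===== SOURCE A (Python) =====
-- def word_matches(h, ref):
--
--     sum=0
--     for word in h:
--         if word in ref:
--             sum+=1
--             ref.remove(word)
--     return sum
--
-- def deep_analysis(h, ref):
--
--     def gen4(list):
--         res = []
--         if len(list) < 4:
--             return list
--         for i in range(len(list) - 3):
--             res.append(list[i] + " " + list[i + 1] + " " + list[i + 2]+ " " + list[i + 3])
--             # print i
--         return res
--
--
--     f_h = gen4(h)
--     f_ref = gen4(ref)
--     f_ref_set = set(f_ref)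
--
--     f_Val= word_matches(f_h, f_ref_set)
--
--     return f_Val#, triVal])/float(2)
-- ===== SOURCE B (Python) =====
-- def deep_analysis(h, ref):
--     def gen4(lst):
--         if len(lst) < 4:
--             return lst
--         return [" ".join(g) for g in zip(lst, lst[1:], lst[2:], lst[3:])]
--     xs = sorted(set(gen4(h)))
--     ys = sorted(set(gen4(ref)))
--     i = j = 0
--     count = 0
--     while i < len(xs) and j < len(ys):
--         if xs[i] == ys[j]:
--             count += 1
--             i += 1
--             j += 1
--         elif xs[i] < ys[j]:
--             i += 1
--         else:
--             j += 1
--     return count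
-- ===== Notes on version B (the rewrite author's own statement) =====
-- stated objective: alternative
-- what changed: B sorts the two deduplicated 4-gram lists and counts matches with a two-pointer merge over the sorted lists (grams built by joining zipped shifted lists), instead of A's per-word membership-test-and-remove loop over a mutable hash set.
import Mathlib
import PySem

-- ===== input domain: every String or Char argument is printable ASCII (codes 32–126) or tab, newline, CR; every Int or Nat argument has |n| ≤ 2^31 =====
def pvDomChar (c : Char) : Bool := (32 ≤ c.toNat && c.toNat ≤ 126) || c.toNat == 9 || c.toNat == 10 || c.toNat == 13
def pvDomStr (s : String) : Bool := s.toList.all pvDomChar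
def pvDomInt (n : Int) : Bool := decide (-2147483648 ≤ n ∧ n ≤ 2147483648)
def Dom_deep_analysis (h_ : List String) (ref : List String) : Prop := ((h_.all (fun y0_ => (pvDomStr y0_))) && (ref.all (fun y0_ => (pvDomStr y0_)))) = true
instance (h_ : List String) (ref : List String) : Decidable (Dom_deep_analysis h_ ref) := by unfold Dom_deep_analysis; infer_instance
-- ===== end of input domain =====

-- B replaces A's hash-set membership-test-and-remove counting loop with sort-then-merge:
-- it sorts the two deduplicated 4-gram lists and counts equal elements with a two-pointer
-- scan (alternative algorithm; same result).

-- ===== PORT A =====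
-- gen4: res = []; if len < 4 return list; for i in range(len-3): res.append(l[i]+" "+l[i+1]+" "+l[i+2]+" "+l[i+3])
def pvGen4A (lst : List String) : List String :=
  if lst.length < 4 then lst
  else (PySem.List.pyRange 0 ((lst.length : Int) - 3) 1).foldl
    (fun res i =>
      res ++ [PySem.List.pyGetD lst i "" ++ " " ++ PySem.List.pyGetD lst (i+1) "" ++ " "
              ++ PySem.List.pyGetD lst (i+2) "" ++ " " ++ PySem.List.pyGetD lst (i+3) ""]) []
    -- indices are always in range here (0 ≤ i < len-3), so the total pyGetD is exact for list[i]

-- word_matches: sum = 0; for word in h: if word in ref: sum += 1; ref.remove(word)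
-- (ref.remove(word) runs only under the membership guard, where it equals Set.discard)
def pvWordMatches (h : List String) (ref : PySem.Set String) : Int :=
  (h.foldl (fun st word =>
      if PySem.Set.contains st.2 word then (st.1 + 1, PySem.Set.discard st.2 word) else st)
    ((0 : Int), ref)).1

def deep_analysis (h_ : List String) (ref : List String) : Int :=
  pvWordMatches (pvGen4A h_) (PySem.Set.ofList (pvGen4A ref))

-- ===== PORT B =====
-- gen4: raw list if len < 4, else [" ".join(g) for g in zip(lst, lst[1:], lst[2:], lst[3:])]
def pvGen4B (lst : List String) : List String :=
  if lst.length < 4 then lst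
  else (((lst.zip (PySem.List.slice lst (some 1) none)).zip
          (PySem.List.slice lst (some 2) none)).zip
          (PySem.List.slice lst (some 3) none)).map
    (fun g => PySem.Str.join " " [g.1.1.1, g.1.1.2, g.1.2, g.2])

-- while i < len(xs) and j < len(ys): compare xs[i] with ys[j]; the indices are guarded
-- to be in range, so the total List.getD is exact for Python's xs[i]
def pvMergeLoop (xs ys : List String) (i j : Nat) (c : Int) : Int :=
  if i < xs.length ∧ j < ys.length then
    if xs.getD i "" = ys.getD j "" then pvMergeLoop xs ys (i+1) (j+1) (c+1)
    else if xs.getD i "" < ys.getD j "" then pvMergeLoop xs ys (i+1) j c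
    else pvMergeLoop xs ys i (j+1) c
  else c
termination_by (xs.length - i) + (ys.length - j)
decreasing_by all_goals omega

def deep_analysis_alt (h_ : List String) (ref : List String) : Int :=
  pvMergeLoop (PySem.List.sorted (PySem.Set.ofList (pvGen4B h_)) (fun x => x) false)
              (PySem.List.sorted (PySem.Set.ofList (pvGen4B ref)) (fun x => x) false)
              0 0 0

-- ===== PRECONDITION & SPEC =====
def Spec_deep_analysis (h_ : List String) (ref : List String) (out : Int) : Prop := out = deep_analysis_alt h_ ref
instance (h_ : List String) (ref : List String) (out : Int) : Decidable (Spec_deep_analysis h_ ref out) := by unfold Spec_deep_analysis; infer_instance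

-- ===== CLAIM (what is proved, stated in full; the proofs are below) =====
def Claim_equal_deep_analysis : Prop := ∀ (h_ : List String) (ref : List String), Dom_deep_analysis h_ ref → Spec_deep_analysis h_ ref (deep_analysis h_ ref)

-- ===== LEMMAS AND PROOFS =====

-- the common 4-gram window list both gen4 helpers compute (for len ≥ 4)
def pvWin4 : List String → List String
  | a :: b :: c :: d :: t => (a ++ " " ++ b ++ " " ++ c ++ " " ++ d) :: pvWin4 (b :: c :: d :: t)
  | _ => []

-- " ".join([a,b,c,d]) is the four concatenations A writes out
theorem pvJoin4 (a b c d : String) :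
    PySem.Str.join " " [a, b, c, d] = a ++ " " ++ b ++ " " ++ c ++ " " ++ d := by
  rw [← String.toList_inj]
  simp [PySem.Str.toList_join, PySem.Chars.join, List.intercalate]

-- A's indexed windows are pvWin4
theorem pvRangeWin (l : List String) :
    (List.range (l.length - 3)).map
      (fun k => l.getD k "" ++ " " ++ l.getD (k+1) "" ++ " "
                ++ l.getD (k+2) "" ++ " " ++ l.getD (k+3) "") = pvWin4 l := by
  induction l with
  | nil => rfl
  | cons a t ih =>
    match t with
    | [] => rfl
    | [_] => rfl
    | [_, _] => rfl
    | b :: c :: d :: t' =>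
      have hlen : (a :: b :: c :: d :: t').length - 3 = (t'.length + 1) := by simp
      rw [hlen, List.range_succ_eq_map, List.map_cons, List.map_map, pvWin4]
      have htail :
          (List.range t'.length).map
            ((fun k => (a :: b :: c :: d :: t').getD k "" ++ " " ++ (a :: b :: c :: d :: t').getD (k+1) "" ++ " "
                ++ (a :: b :: c :: d :: t').getD (k+2) "" ++ " " ++ (a :: b :: c :: d :: t').getD (k+3) "") ∘ Nat.succ)
            = pvWin4 (b :: c :: d :: t') := by
        have hlen2 : (b :: c :: d :: t').length - 3 = t'.length := by simp
        rw [← ih, hlen2]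
        apply List.map_congr_left
        intro k _
        simp [Function.comp]
      rw [htail]
      simp [List.getD]

-- B's zip-built windows are pvWin4
theorem pvZipWin (l : List String) :
    (((l.zip (l.drop 1)).zip (l.drop 2)).zip (l.drop 3)).map
      (fun g => PySem.Str.join " " [g.1.1.1, g.1.1.2, g.1.2, g.2]) = pvWin4 l := by
  induction l with
  | nil => rfl
  | cons a t ih =>
    match t with
    | [] => rfl
    | [_] => rfl
    | [_, _] => rfl
    | b :: c :: d :: t' =>
      show (((((a :: b :: c :: d :: t').zip (b :: c :: d :: t')).zip (c :: d :: t')).zip (d :: t')).map _) = _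
      rw [List.zip_cons_cons, List.zip_cons_cons, List.zip_cons_cons, List.map_cons, pvWin4, pvJoin4]
      exact congrArg _ ih

-- the two gen4 helpers produce the same list of 4-grams
theorem pvGen4_eq (lst : List String) : pvGen4A lst = pvGen4B lst := by
  unfold pvGen4A pvGen4B
  split
  · rfl
  · rename_i hlen
    -- A side: foldl-append to map over the range, then to pvWin4
    rw [PySem.List.foldl_append_singleton_eq_map, List.nil_append]
    have hA : (PySem.List.pyRange 0 ((lst.length : Int) - 3) 1).map
        (fun i => PySem.List.pyGetD lst i "" ++ " " ++ PySem.List.pyGetD lst (i+1) "" ++ " "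
                  ++ PySem.List.pyGetD lst (i+2) "" ++ " " ++ PySem.List.pyGetD lst (i+3) "") = pvWin4 lst := by
      rw [PySem.List.pyRange_one, List.map_map]
      have hcast : ((lst.length : Int) - 3 - 0).toNat = lst.length - 3 := by omega
      rw [hcast, ← pvRangeWin]
      apply List.map_congr_left
      intro k _
      show PySem.List.pyGetD lst (0 + (k : Int)) "" ++ _ ++ _ ++ _ ++ _ ++ _ ++ _ = _
      have g : ∀ m : Nat, PySem.List.pyGetD lst ((m : Int)) "" = lst.getD m "" :=
        fun m => PySem.List.pyGetD_natCast lst m ""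
      have e0 : (0 : Int) + (k : Int) = ((k : Nat) : Int) := by ring
      have e1 : (0 : Int) + (k : Int) + 1 = ((k + 1 : Nat) : Int) := by push_cast; ring
      have e2 : (0 : Int) + (k : Int) + 2 = ((k + 2 : Nat) : Int) := by push_cast; ring
      have e3 : (0 : Int) + (k : Int) + 3 = ((k + 3 : Nat) : Int) := by push_cast; ring
      rw [e0, e1, e2, e3, g, g, g, g]
    rw [hA]
    have s1 : PySem.List.slice lst (some 1) none = lst.drop 1 := by
      simpa using PySem.List.slice_from_natCast lst 1
    have s2 : PySem.List.slice lst (some 2) none = lst.drop 2 := by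
      simpa using PySem.List.slice_from_natCast lst 2
    have s3 : PySem.List.slice lst (some 3) none = lst.drop 3 := by
      simpa using PySem.List.slice_from_natCast lst 3
    rw [s1, s2, s3]
    exact (pvZipWin lst).symm

-- structural two-pointer merge count
def pvCC : List String → List String → Int
  | x :: xs, y :: ys =>
    if x = y then 1 + pvCC xs ys
    else if x < y then pvCC xs (y :: ys)
    else pvCC (x :: xs) ys
  | _, _ => 0
termination_by xs ys => xs.length + ys.length
decreasing_by all_goals (simp only [List.length_cons]; omega)

-- the index loop computes pvCC on the remaining suffixes
theorem pvMergeLoop_eq_cc (xs ys : List String) (i j : Nat) (c : Int) :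
    pvMergeLoop xs ys i j c = c + pvCC (xs.drop i) (ys.drop j) := by
  fun_induction pvMergeLoop xs ys i j c with
  | case1 i j c h heq ih =>
    rw [ih]
    obtain ⟨hi, hj⟩ := h
    rw [List.drop_eq_getElem_cons hi, List.drop_eq_getElem_cons hj, pvCC]
    rw [List.getD_eq_getElem xs "" hi, List.getD_eq_getElem ys "" hj] at heq
    rw [if_pos heq]
    ring
  | case2 i j c h hne hlt ih =>
    rw [ih]
    obtain ⟨hi, hj⟩ := h
    rw [List.drop_eq_getElem_cons hi, List.drop_eq_getElem_cons hj, pvCC]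
    rw [List.getD_eq_getElem xs "" hi, List.getD_eq_getElem ys "" hj] at hne hlt
    rw [if_neg hne, if_pos hlt, ← List.drop_eq_getElem_cons hj]
  | case3 i j c h hne hnlt ih =>
    rw [ih]
    obtain ⟨hi, hj⟩ := h
    rw [List.drop_eq_getElem_cons hi, List.drop_eq_getElem_cons hj, pvCC]
    rw [List.getD_eq_getElem xs "" hi, List.getD_eq_getElem ys "" hj] at hne hnlt
    rw [if_neg hne, if_neg hnlt, ← List.drop_eq_getElem_cons hi]
  | case4 i j c h =>
    have hd : xs.drop i = [] ∨ ys.drop j = [] := by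
      rcases not_and_or.mp h with h' | h'
      · left; rw [List.drop_eq_nil_iff]; omega
      · right; rw [List.drop_eq_nil_iff]; omega
    rcases hd with h' | h' <;> rw [h']
    · cases ys.drop j <;> simp [pvCC]
    · cases xs.drop i <;> simp [pvCC]

-- on strictly increasing lists, the merge count is the number of common elements
theorem pvCC_filter (xs ys : List String) :
    xs.Pairwise (· < ·) → ys.Pairwise (· < ·) →
    pvCC xs ys = ((xs.filter (fun x => decide (x ∈ ys))).length : Int) := by
  fun_induction pvCC xs ys with
  | case1 xs y ys ih =>
    intro hx hy
    have hfe : xs.filter (fun z => decide (z ∈ y :: ys)) = xs.filter (fun z => decide (z ∈ ys)) := by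
      apply List.filter_congr
      intro z hz
      have hxz : y < z := (List.pairwise_cons.mp hx).1 z hz
      simp [List.mem_cons, ne_of_gt hxz]
    rw [List.filter_cons, if_pos (show (fun z => decide (z ∈ y :: ys)) y = true by simp),
        List.length_cons, hfe, ih hx.tail hy.tail]
    push_cast; ring
  | case2 x xs y ys hne hlt ih =>
    intro hx hy
    rw [List.filter_cons]
    have hnm : x ∉ y :: ys := by
      intro hm
      rcases List.mem_cons.mp hm with rfl | hm'
      · exact hne rfl
      · exact absurd ((List.pairwise_cons.mp hy).1 x hm') (lt_asymm hlt)
    simp only [hnm, decide_false, Bool.false_eq_true, not_false_iff, if_neg]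
    exact ih hx.tail hy
  | case3 x xs y ys hne hnlt ih =>
    intro hx hy
    have hylt : y < x := lt_of_le_of_ne (not_lt.mp hnlt) (fun h => hne h.symm)
    have hfe : (x :: xs).filter (fun z => decide (z ∈ y :: ys)) =
        (x :: xs).filter (fun z => decide (z ∈ ys)) := by
      apply List.filter_congr
      intro z hz
      have hyz : y < z := by
        rcases List.mem_cons.mp hz with rfl | hz'
        · exact hylt
        · exact lt_trans hylt ((List.pairwise_cons.mp hx).1 z hz')
      simp [List.mem_cons, ne_of_gt hyz]
    rw [hfe]
    exact ih hx hy.tail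
  | case4 a b hnc =>
    intro _ _
    match a, b, hnc with
    | [], b, _ => simp
    | x :: xs, [], _ => simp
    | x :: xs, y :: ys, hnc => exact (hnc x xs y ys rfl rfl).elim

-- membership in s.discard(x)
theorem pvContainsDiscard (s : List String) (x y : String) :
    PySem.Set.contains (PySem.Set.discard s x) y = ((!(y == x)) && PySem.Set.contains s y) := by
  by_cases h : y = x <;> simp [PySem.Set.contains, PySem.Set.discard, List.mem_filter, h]

-- loop invariant for word_matches: the running sum counts the distinct elements of xs still in s
theorem pvWM_aux (xs : List String) (s : List String) (n : Int) :
    (xs.foldl (fun st word =>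
        if PySem.Set.contains st.2 word then (st.1 + 1, PySem.Set.discard st.2 word) else st)
      (n, s)).1
    = n + (((PySem.Set.ofList xs).filter (fun x => PySem.Set.contains s x)).length : Int) := by
  induction xs generalizing s n with
  | nil => simp [PySem.Set.ofList]
  | cons x xs ih =>
    rw [PySem.Set.ofList_cons, List.foldl_cons, List.filter_cons]
    by_cases hx : PySem.Set.contains s x
    · rw [if_pos hx, if_pos hx, ih, List.length_cons]
      have hfe : ((PySem.Set.ofList xs).discard x).filter (fun y => PySem.Set.contains s y)
          = (PySem.Set.ofList xs).filter (fun y => PySem.Set.contains (PySem.Set.discard s x) y) := by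
        show ((PySem.Set.ofList xs).filter (fun y => !(y == x))).filter
            (fun y => PySem.Set.contains s y) = _
        rw [List.filter_filter]
        apply List.filter_congr
        intro y _
        rw [pvContainsDiscard]
        exact (Bool.and_comm _ _).symm
      rw [hfe]
      push_cast; ring
    · rw [if_neg hx, if_neg hx, ih]
      have hfe : ((PySem.Set.ofList xs).discard x).filter (fun y => PySem.Set.contains s y)
          = (PySem.Set.ofList xs).filter (fun y => PySem.Set.contains s y) := by
        show ((PySem.Set.ofList xs).filter (fun y => !(y == x))).filter
            (fun y => PySem.Set.contains s y) = _
        rw [List.filter_filter]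
        apply List.filter_congr
        intro y _
        by_cases hy : y = x
        · subst hy
          have hns : y ∉ s := by simpa [PySem.Set.contains] using hx
          simp [PySem.Set.contains, hns]
        · simp [hy]
      rw [hfe]

-- ===== VERDICT (by name: the statement is the Claim_ definition above) =====
theorem deep_analysis_spec : Claim_equal_deep_analysis := by
  intro h_ ref _
  unfold Spec_deep_analysis deep_analysis deep_analysis_alt pvWordMatches
  rw [pvWM_aux, pvMergeLoop_eq_cc]
  simp only [List.drop_zero, zero_add]
  rw [pvCC_filter _ _ (PySem.List.sorted_ofList_pairwise_lt _) (PySem.List.sorted_ofList_pairwise_lt _),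
      pvGen4_eq h_, pvGen4_eq ref]
  congr 1
  have hperm : (PySem.List.sorted (PySem.Set.ofList (pvGen4B h_)) (fun x => x) false).Perm
      (PySem.Set.ofList (pvGen4B h_)) := PySem.List.sorted_perm _ _ _
  rw [(hperm.filter _).length_eq]
  congr 1
  apply List.filter_congr
  intro y _
  simp [PySem.Set.contains, PySem.List.mem_sorted]
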